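-- pv_equiv track=rewrite | github.com/sducp-88/Sleep-Apnea-and-WMH | scripts/notebook_steps/08_wmh_cognitive_mediation.py | find_group_coef
-- ===== SOURCE A (Python) =====
-- def find_group_coef(params_index):
--     for name in params_index:
--         if name.startswith("C(group)[T.") and name.endswith("Study]"):
--             return name
--     for name in params_index:
--         if name.startswith("C(group)[T."):
--             return name
--     return None
-- ===== SOURCE B (Python) =====
-- def find_group_coef(params_index):
--     fallback = None
--     for name in params_index:
--         if name.startswith("C(group)[T."):
--             if name.endswith("Study]"):
--                 return name
--             if fallback is None:
--                 fallback = name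
--     return fallback
-- ===== Notes on version B (the rewrite author's own statement) =====
-- stated objective: simpler
-- what changed: Fused A's two sequential scans into a single pass that returns immediately on a prefix+suffix match and remembers the first prefix-only match as a fallback.
import Mathlib
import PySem

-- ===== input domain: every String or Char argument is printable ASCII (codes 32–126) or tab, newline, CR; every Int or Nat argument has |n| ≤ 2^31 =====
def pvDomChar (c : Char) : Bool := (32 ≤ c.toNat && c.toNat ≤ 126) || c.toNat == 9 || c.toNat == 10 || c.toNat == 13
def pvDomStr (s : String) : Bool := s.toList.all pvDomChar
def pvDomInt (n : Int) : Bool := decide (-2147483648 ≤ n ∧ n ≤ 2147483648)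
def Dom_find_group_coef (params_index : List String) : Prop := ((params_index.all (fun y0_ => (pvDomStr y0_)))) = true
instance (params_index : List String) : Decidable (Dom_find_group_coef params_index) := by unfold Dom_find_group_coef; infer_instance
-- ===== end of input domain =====

-- B fuses A's two sequential scans into one pass with a first-prefix-only fallback; objective: simpler.

-- ===== PORT A =====
-- first loop of A: first name with prefix "C(group)[T." AND suffix "Study]"
def pvFindFull : List String → Option String
  | [] => none
  | n :: t =>
    if PySem.Str.startswith n "C(group)[T." && PySem.Str.endswith n "Study]" then some n
    else pvFindFull t

-- second loop of A: first name with the prefix only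
def pvFindPre : List String → Option String
  | [] => none
  | n :: t =>
    if PySem.Str.startswith n "C(group)[T." then some n
    else pvFindPre t

def find_group_coef (params_index : List String) : Option String :=
  match pvFindFull params_index with
  | some n => some n
  | none => pvFindPre params_index

-- ===== PORT B =====
-- single pass with a fallback accumulator (first prefix-only hit)
def pvBLoop : List String → Option String → Option String
  | [], fb => fb
  | n :: t, fb =>
    if PySem.Str.startswith n "C(group)[T." then
      if PySem.Str.endswith n "Study]" then some n
      else pvBLoop t (match fb with | none => some n | some f => some f)
    else pvBLoop t fb

def find_group_coef_alt (params_index : List String) : Option String :=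
  pvBLoop params_index none

-- ===== PRECONDITION & SPEC =====
def Spec_find_group_coef (params_index : List String) (out : Option String) : Prop := out = find_group_coef_alt params_index
instance (params_index : List String) (out : Option String) : Decidable (Spec_find_group_coef params_index out) := by unfold Spec_find_group_coef; infer_instance

-- ===== CLAIM (what is proved, stated in full; the proofs are below) =====
def Claim_equal_find_group_coef : Prop := ∀ (params_index : List String), Dom_find_group_coef params_index → Spec_find_group_coef params_index (find_group_coef params_index)

-- ===== LEMMAS AND PROOFS =====
theorem pvBLoop_eq (xs : List String) : ∀ (fb : Option String),
    pvBLoop xs fb =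
      match pvFindFull xs with
      | some m => some m
      | none => match fb with
                | some f => some f
                | none => pvFindPre xs := by
  induction xs with
  | nil => intro fb; cases fb <;> rfl
  | cons n t ih =>
    intro fb
    cases hp : PySem.Str.startswith n "C(group)[T." <;>
      cases hs : PySem.Str.endswith n "Study]" <;>
        cases fb <;>
          simp only [pvBLoop, pvFindFull, pvFindPre, hp, hs, ih, Bool.false_and, Bool.true_and,
            Bool.and_self, Bool.false_eq_true, if_false, if_true] <;>
          try first
            | rfl
            | (cases pvFindFull t <;> rfl)

-- ===== VERDICT (by name: the statement is the Claim_ definition above) =====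
theorem find_group_coef_spec : Claim_equal_find_group_coef := by
  intro xs _
  unfold Spec_find_group_coef find_group_coef find_group_coef_alt
  rw [pvBLoop_eq]
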